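-- pv_equiv track=rewrite | github.com/jonpang1/Advent-of-Code | 2022/Day-25/snafu.py | convert_snafu_2_decimal
-- ===== SOURCE A (Python) =====
-- def convert_snafu_2_decimal(snafu):
--     digits = [str(x) for x in str(snafu)]
--     digits = [digit.replace("-", "-1") for digit in digits]
--     digits = [digit.replace("=", "-2") for digit in digits][::-1]
--
--     position = 0
--     decimal = 0
--
--     for digit in digits:
--         decimal = decimal + int(digit) * (5**position)
--         position = position + 1
--
--     return decimal
-- ===== SOURCE B (Python) =====
-- def convert_snafu_2_decimal(snafu):
--     decimal = 0
--     for ch in str(snafu):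
--         digit = ch.replace("-", "-1").replace("=", "-2")
--         decimal = decimal * 5 + int(digit)
--     return decimal
-- ===== Notes on version B (the rewrite author's own statement) =====
-- stated objective: simpler
-- what changed: Horner's method: a single left-to-right pass updating decimal = decimal*5 + value, instead of building and reversing a digit list and tracking a position with 5**position.
import Mathlib
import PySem

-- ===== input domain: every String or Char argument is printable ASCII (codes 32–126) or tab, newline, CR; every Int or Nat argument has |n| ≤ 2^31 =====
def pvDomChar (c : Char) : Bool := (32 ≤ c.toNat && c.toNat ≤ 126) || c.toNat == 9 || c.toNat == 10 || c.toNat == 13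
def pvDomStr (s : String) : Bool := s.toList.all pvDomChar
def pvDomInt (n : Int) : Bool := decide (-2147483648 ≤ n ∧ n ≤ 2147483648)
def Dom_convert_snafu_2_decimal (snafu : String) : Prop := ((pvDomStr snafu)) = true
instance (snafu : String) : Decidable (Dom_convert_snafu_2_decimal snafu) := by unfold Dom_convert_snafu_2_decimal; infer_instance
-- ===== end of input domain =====

-- B converts SNAFU to decimal by Horner's rule in one left-to-right pass (decimal = decimal*5 + value),
-- instead of A's build-three-lists, reverse, and positional 5**position sum; objective: simpler.

-- ===== PORT A =====
def convert_snafu_2_decimal (snafu : String) : Int :=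
  let digits := snafu.toList.map (fun x => String.ofList [x])
  let digits := digits.map (fun digit => PySem.Str.replace digit "-" "-1")
  let digits := (digits.map (fun digit => PySem.Str.replace digit "=" "-2")).reverse
  -- state = (position, decimal); int(digit) = PySem.Int.ofStr? (Pre_ excludes the ValueError chars)
  let r := digits.foldl
    (fun (st : Int × Int) digit =>
      (st.1 + 1, st.2 + (PySem.Int.ofStr? digit).getD 0 * 5 ^ st.1.toNat))
    (0, 0)
  r.2

-- ===== PORT B =====
def convert_snafu_2_decimal_alt (snafu : String) : Int :=
  snafu.toList.foldl
    (fun decimal ch =>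
      decimal * 5 +
        (PySem.Int.ofStr?
          (PySem.Str.replace (PySem.Str.replace (String.ofList [ch]) "-" "-1") "=" "-2")).getD 0)
    0

-- ===== PRECONDITION & SPEC =====
-- Pre_: every character is a decimal digit, a minus sign or an equals sign; on any other character Python's int() raises ValueError in both A and B.
def pvSnafuChar (c : Char) : Bool := c.isDigit || c == '-' || c == '='
def Pre_convert_snafu_2_decimal (snafu : String) : Prop :=
  snafu.toList.all pvSnafuChar = true
instance (snafu : String) : Decidable (Pre_convert_snafu_2_decimal snafu) := by
  unfold Pre_convert_snafu_2_decimal; infer_instance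

def pvWitness_convert_snafu_2_decimal : String := "1=-0-2"

def Spec_convert_snafu_2_decimal (snafu : String) (out : Int) : Prop := out = convert_snafu_2_decimal_alt snafu
instance (snafu : String) (out : Int) : Decidable (Spec_convert_snafu_2_decimal snafu out) := by unfold Spec_convert_snafu_2_decimal; infer_instance

-- ===== CLAIM (what is proved, stated in full; the proofs are below) =====
def Claim_equal_convert_snafu_2_decimal : Prop := ∀ (snafu : String), Dom_convert_snafu_2_decimal snafu → Pre_convert_snafu_2_decimal snafu → Spec_convert_snafu_2_decimal snafu (convert_snafu_2_decimal snafu)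

-- ===== LEMMAS AND PROOFS =====

-- the per-character value both programs compute (replace, replace, int)
def pvVal (c : Char) : Int :=
  (PySem.Int.ofStr?
    (PySem.Str.replace (PySem.Str.replace (String.ofList [c]) "-" "-1") "=" "-2")).getD 0

-- Horner value of a digit list (most significant first)
def pvH : List Int → Int
  | [] => 0
  | v :: t => v * 5 ^ t.length + pvH t

-- positional value of a digit list starting at position p (least significant first)
def pvG : List Int → Nat → Int
  | [], _ => 0
  | v :: t, p => v * 5 ^ p + pvG t (p + 1)

lemma pvB_fold (l : List Int) : ∀ a : Int,
    l.foldl (fun d v => d * 5 + v) a = a * 5 ^ l.length + pvH l := by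
  induction l with
  | nil => intro a; simp [pvH]
  | cons v t ih =>
      intro a
      simp only [List.foldl_cons, ih, pvH, List.length_cons]
      ring

lemma pvA_fold (l : List Int) : ∀ (p : Nat) (d : Int),
    l.foldl (fun (st : Int × Int) v => (st.1 + 1, st.2 + v * 5 ^ st.1.toNat)) ((p : Int), d)
      = (((p + l.length : Nat) : Int), d + pvG l p) := by
  induction l with
  | nil => intro p d; simp [pvG]
  | cons v t ih =>
      intro p d
      have h1 : ((p : Int) + 1) = ((p + 1 : Nat) : Int) := by push_cast; ring
      simp only [List.foldl_cons, Int.toNat_natCast, h1, ih (p + 1) (d + v * 5 ^ p)]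
      rw [Prod.mk.injEq]
      refine ⟨?_, ?_⟩
      · congr 1; simp [List.length_cons]; omega
      · simp only [pvG]; ring

lemma pvG_append (xs : List Int) : ∀ (v : Int) (p : Nat),
    pvG (xs ++ [v]) p = pvG xs p + v * 5 ^ (p + xs.length) := by
  induction xs with
  | nil => intro v p; simp [pvG]
  | cons x t ih =>
      intro v p
      simp only [List.cons_append, pvG, ih v (p + 1), List.length_cons]
      ring_nf

lemma pvG_reverse (l : List Int) : pvG l.reverse 0 = pvH l := by
  induction l with
  | nil => rfl
  | cons v t ih =>
      simp only [List.reverse_cons, pvG_append, ih, pvH, List.length_reverse]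
      ring

lemma pv_foldl_map {α β γ : Type} (f : α → β) (g : γ → β → γ) (l : List α) (init : γ) :
    l.foldl (fun s a => g s (f a)) init = (l.map f).foldl g init := by
  induction l generalizing init with
  | nil => rfl
  | cons x t ih => simp only [List.foldl_cons, List.map_cons, ih]

lemma pv_ports_eq (snafu : String) :
    convert_snafu_2_decimal snafu = convert_snafu_2_decimal_alt snafu := by
  unfold convert_snafu_2_decimal convert_snafu_2_decimal_alt
  simp only [List.map_map, ← List.map_reverse, List.foldl_map]
  show (snafu.toList.reverse.foldl
      (fun (st : Int × Int) c => (st.1 + 1, st.2 + pvVal c * 5 ^ st.1.toNat)) (0, 0)).2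
    = snafu.toList.foldl (fun d c => d * 5 + pvVal c) 0
  have e1 := pv_foldl_map pvVal
    (fun (st : Int × Int) v => (st.1 + 1, st.2 + v * 5 ^ st.1.toNat))
    snafu.toList.reverse (0, 0)
  rw [List.map_reverse] at e1
  have e2 := pv_foldl_map pvVal (fun (d : Int) v => d * 5 + v) snafu.toList 0
  rw [e1, e2]
  rw [show ((0 : Int), (0 : Int)) = (((0 : Nat) : Int), (0 : Int)) from by norm_num,
      pvA_fold, pvB_fold]
  simp [pvG_reverse]

-- ===== VERDICT (by name: the statement is the Claim_ definition above) =====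
theorem convert_snafu_2_decimal_spec : Claim_equal_convert_snafu_2_decimal := by
  intro snafu _ _
  unfold Spec_convert_snafu_2_decimal
  exact pv_ports_eq snafu
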